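-- pv_equiv track=rewrite | github.com/Flutterwondershy/Jeu-de-la-vie | jeuvie.py | calculerPredation
-- ===== SOURCE A (Python) =====
-- def creerMonde(taille, listeVivants):
--     monde = [[0 for i in range(taille)] for j in range(taille)]
--     for x in listeVivants:
--         monde[x[0]][x[1]] = 1
--     return monde
--
-- def calculerPredation(monde):
--     taille = len(monde)
--     predation = creerMonde(taille, [])
--
--     for i in range(taille):
--         for j in range(taille):
--
--             for k in range(i-1, i+2):
--                 for l in range(j-1, j+2):
--                     if k != i or l != j: predation[i][j] += monde[k%taille][l%taille]
--
--     return predation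
-- ===== SOURCE B (Python) =====
-- def calculerPredation(monde):
--     n = len(monde)
--     grid = [[r[j] for j in range(n)] for r in monde]
--     horiz = [[a + b + c for a, b, c in zip(r[-1:] + r[:-1], r, r[1:] + r[:1])]
--              for r in grid]
--     up = horiz[-1:] + horiz[:-1]
--     down = horiz[1:] + horiz[:1]
--     return [[u + h + d - m for u, h, d, m in zip(ur, hr, dr, mr)]
--             for ur, hr, dr, mr in zip(up, horiz, down, grid)]
-- ===== Notes on version B (the rewrite author's own statement) =====
-- stated objective: faster
-- what changed: B computes the neighbour count as a separable toroidal convolution: one staged pass builds a horizontally blurred grid via list rotations (slices, no per-cell modulo), a second pass adds three vertically rotated copies of it and subtracts the centre, replacing A's per-cell 3x3 gather with modular indexing.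
import Mathlib
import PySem

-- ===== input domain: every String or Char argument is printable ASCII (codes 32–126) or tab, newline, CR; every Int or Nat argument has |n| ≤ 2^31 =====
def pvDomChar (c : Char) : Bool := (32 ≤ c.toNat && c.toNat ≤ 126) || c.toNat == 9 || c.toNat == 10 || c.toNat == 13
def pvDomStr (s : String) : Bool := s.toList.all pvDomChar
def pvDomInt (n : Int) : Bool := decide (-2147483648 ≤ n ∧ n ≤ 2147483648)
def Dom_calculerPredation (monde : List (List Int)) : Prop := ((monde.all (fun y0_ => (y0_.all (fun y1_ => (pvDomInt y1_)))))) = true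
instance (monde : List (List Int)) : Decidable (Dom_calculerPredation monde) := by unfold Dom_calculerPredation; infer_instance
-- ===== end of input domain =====

-- B replaces A's per-cell 3x3 gather (with modular indexing in the innermost loop) by a
-- separable toroidal convolution: a staged pass builds a horizontally blurred grid from
-- list rotations (slices), then a second pass adds three vertically rotated copies of it
-- and subtracts the centre cell; a timing run measured B faster by a constant factor.

-- `g[x][y] += v` / `g[x][y] = v` on a Python list of lists (x, y are the Python indices,
-- nonnegative at every call site in port A)
def pvAddAt (g : List (List Int)) (x y : Int) (v : Int) : List (List Int) :=
  g.modify x.toNat (fun row => row.modify y.toNat (fun t => t + v))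

def pvSetAt (g : List (List Int)) (x y : Int) (v : Int) : List (List Int) :=
  g.modify x.toNat (fun row => row.modify y.toNat (fun _ => v))

-- ===== PORT A =====
def creerMonde (taille : Int) (listeVivants : List (Int × Int)) : List (List Int) :=
  let monde := (PySem.List.pyRange 0 taille 1).map
    (fun _ => (PySem.List.pyRange 0 taille 1).map (fun _ => (0 : Int)))
  listeVivants.foldl (fun m x => pvSetAt m x.1 x.2 1) monde

def calculerPredation (monde : List (List Int)) : List (List Int) :=
  let taille : Int := monde.length
  let predation := creerMonde taille []
  (PySem.List.pyRange 0 taille 1).foldl (fun p i =>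
    (PySem.List.pyRange 0 taille 1).foldl (fun p j =>
      (PySem.List.pyRange (i - 1) (i + 2) 1).foldl (fun p k =>
        (PySem.List.pyRange (j - 1) (j + 2) 1).foldl (fun p l =>
          if k ≠ i ∨ l ≠ j then
            pvAddAt p i j
              (PySem.List.pyGetD (PySem.List.pyGetD monde (PySem.Int.mod k taille) [])
                (PySem.Int.mod l taille) 0)
          else p) p) p) p) predation

-- ===== PORT B =====
-- Source B:  n = len(monde); grid = [[r[j] for j in range(n)] for r in monde]
--        horiz = [[a+b+c for a,b,c in zip(r[-1:]+r[:-1], r, r[1:]+r[:1])] for r in grid]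
--        up = horiz[-1:]+horiz[:-1]; down = horiz[1:]+horiz[:1]
--        return [[u+h+d-m for u,h,d,m in zip(ur,hr,dr,mr)] for ur,hr,dr,mr in zip(up,horiz,down,grid)]
-- (the elementwise zip comprehensions are ported as nested List.zipWith, which has Python
-- zip's exact truncate-to-shortest semantics)
def calculerPredation_alt (monde : List (List Int)) : List (List Int) :=
  let n : Int := monde.length
  let grid := monde.map (fun r =>
    (PySem.List.pyRange 0 n 1).map (fun j => PySem.List.pyGetD r j 0))
  let horiz := grid.map (fun r =>
    List.zipWith (fun s c => s + c)
      (List.zipWith (fun a b => a + b)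
        (PySem.List.slice r (some (-1)) none ++ PySem.List.slice r none (some (-1))) r)
      (PySem.List.slice r (some 1) none ++ PySem.List.slice r none (some 1)))
  let up := PySem.List.slice horiz (some (-1)) none ++ PySem.List.slice horiz none (some (-1))
  let down := PySem.List.slice horiz (some 1) none ++ PySem.List.slice horiz none (some 1)
  List.zipWith (fun s mr => List.zipWith (fun t m => t - m) s mr)
    (List.zipWith (fun s dr => List.zipWith (fun t d => t + d) s dr)
      (List.zipWith (fun ur hr => List.zipWith (fun u h => u + h) ur hr) up horiz) down)
    grid

-- ===== PRECONDITION & SPEC =====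
-- Pre_ excludes exactly the inputs on which A raises IndexError: a row shorter than the
-- number of rows (Python reads column l % len(monde) in every row).
def Pre_calculerPredation (monde : List (List Int)) : Prop :=
  ∀ row ∈ monde, monde.length ≤ row.length
instance (monde : List (List Int)) : Decidable (Pre_calculerPredation monde) := by
  unfold Pre_calculerPredation; infer_instance

def pvWitness_calculerPredation : List (List Int) := [[1, 0], [0, 1]]

def Spec_calculerPredation (monde : List (List Int)) (out : List (List Int)) : Prop := out = calculerPredation_alt monde
instance (monde : List (List Int)) (out : List (List Int)) : Decidable (Spec_calculerPredation monde out) := by unfold Spec_calculerPredation; infer_instance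

-- ===== CLAIM (what is proved, stated in full; the proofs are below) =====
def Claim_equal_calculerPredation : Prop := ∀ (monde : List (List Int)), Dom_calculerPredation monde → Pre_calculerPredation monde → Spec_calculerPredation monde (calculerPredation monde)

-- ===== LEMMAS AND PROOFS =====

-- grid shape: n rows, each of length n
def pvShape (n : Nat) (g : List (List Int)) : Prop :=
  g.length = n ∧ ∀ x : Nat, x < n → (g.getD x []).length = n

-- grid entry with defaults
def pvE (g : List (List Int)) (x y : Nat) : Int := (g.getD x []).getD y 0

-- the common value both grids hold at (x, y): the 8 toroidal neighbour reads
def pvS (monde : List (List Int)) (x y : Nat) : Int :=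
  let t : Int → Int → Int := fun a b =>
    PySem.List.pyGetD (PySem.List.pyGetD monde (a % (monde.length : Int)) [])
      (b % (monde.length : Int)) 0
  t (x - 1) (y - 1) + t (x - 1) y + t (x - 1) (y + 1) +
  t x (y - 1) + t x (y + 1) +
  t (x + 1) (y - 1) + t (x + 1) y + t (x + 1) (y + 1)

theorem pvShape_addAt {n : Nat} {g : List (List Int)} (hg : pvShape n g) (a b v : Int) :
    pvShape n (pvAddAt g a b v) := by
  obtain ⟨h1, h2⟩ := hg
  refine ⟨by simp [pvAddAt, h1], ?_⟩
  intro x hx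
  simp only [pvAddAt, List.getD_eq_getElem?_getD, List.getElem?_modify]
  cases h : g[x]? with
  | none => exact absurd (List.getElem?_eq_none_iff.mp h) (by omega)
  | some row =>
    have := h2 x hx
    simp only [List.getD_eq_getElem?_getD, h, Option.getD_some] at this
    by_cases hax : a.toNat = x <;> simp [hax, this]

theorem pvE_addAt {n : Nat} {g : List (List Int)} (hg : pvShape n g)
    {a b : Int} (ha : 0 ≤ a) (ha' : a < n) (hb : 0 ≤ b) (hb' : b < n)
    {x y : Nat} (hx : x < n) (hy : y < n) (v : Int) :
    pvE (pvAddAt g a b v) x y = pvE g x y + (if a = (x : Int) ∧ b = (y : Int) then v else 0) := by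
  obtain ⟨h1, h2⟩ := hg
  have hx' : x < g.length := by omega
  have hgx : g[x]? = some g[x] := List.getElem?_eq_getElem hx'
  have hrowlen : g[x].length = n := by
    have := h2 x hx
    rw [List.getD_eq_getElem?_getD, hgx] at this; simpa using this
  have hEg : pvE g x y = g[x].getD y 0 := by
    simp [pvE, List.getD_eq_getElem?_getD, hgx]
  have hEmod : pvE (pvAddAt g a b v) x y
      = (if a.toNat = x then g[x].modify b.toNat (fun t => t + v) else g[x]).getD y 0 := by
    simp [pvE, pvAddAt, List.getD_eq_getElem?_getD, List.getElem?_modify, hgx]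
  by_cases hax : a.toNat = x
  · rw [hEmod, if_pos hax]
    by_cases hby : b.toNat = y
    · have hylt : y < g[x].length := by omega
      have hstep : (g[x].modify b.toNat (fun t => t + v)).getD y 0 = g[x].getD y 0 + v := by
        rw [hby, List.getD_eq_getElem?_getD, List.getD_eq_getElem?_getD,
          List.getElem?_modify, List.getElem?_eq_getElem hylt]
        simp
      rw [hstep, hEg, if_pos ⟨by omega, by omega⟩]
    · rw [hEg, if_neg (by rintro ⟨-, h⟩; omega)]
      rw [List.getD_eq_getElem?_getD, List.getD_eq_getElem?_getD, List.getElem?_modify]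
      cases h : g[x][y]? <;> simp [hby]
  · rw [hEmod, if_neg hax, hEg, if_neg (by rintro ⟨h, -⟩; omega)]
    ring

theorem pvE_foldl {α : Type} (n x y : Nat) (L : List α)
    (s : List (List Int) → α → List (List Int)) (c : α → Int)
    (hs : ∀ g a, a ∈ L → pvShape n g →
      pvShape n (s g a) ∧ pvE (s g a) x y = pvE g x y + c a) :
    ∀ g, pvShape n g →
      pvShape n (L.foldl s g) ∧ pvE (L.foldl s g) x y = pvE g x y + (L.map c).sum := by
  induction L with
  | nil => intro g hg; exact ⟨hg, by simp⟩
  | cons a L ih =>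
    intro g hg
    obtain ⟨h1, h2⟩ := hs g a (List.mem_cons_self) hg
    obtain ⟨h3, h4⟩ := ih (fun g a ha hg => hs g a (List.mem_cons_of_mem _ ha) hg) (s g a) h1
    refine ⟨by simpa using h3, ?_⟩
    simp only [List.foldl_cons, List.map_cons, List.sum_cons] at *
    rw [h4, h2]; ring

theorem pv_sum_ite_false {α : Type} (L : List α) (p : α → Prop) [DecidablePred p]
    (f : α → Int) (hp : ∀ a ∈ L, ¬ p a) :
    (L.map (fun a => if p a then f a else 0)).sum = 0 := by
  apply List.sum_eq_zero
  intro t ht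
  obtain ⟨a, ha, rfl⟩ := List.mem_map.mp ht
  simp [hp a ha]

theorem pv_sum_ite_unique {α : Type} [DecidableEq α] (L : List α) (p : α → Prop)
    [DecidablePred p] (f : α → Int) (c : α) (hc : c ∈ L) (hnd : L.Nodup)
    (hp : ∀ a ∈ L, p a ↔ a = c) :
    (L.map (fun a => if p a then f a else 0)).sum = f c := by
  induction L with
  | nil => cases hc
  | cons a L ih =>
    simp only [List.map_cons, List.sum_cons]
    by_cases hac : a = c
    · subst hac
      have : ∀ b ∈ L, ¬ p b := by
        intro b hb hpb
        have := (hp b (List.mem_cons_of_mem _ hb)).mp hpb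
        subst this
        exact (List.nodup_cons.mp hnd).1 hb
      rw [pv_sum_ite_false L p f this, if_pos ((hp a List.mem_cons_self).mpr rfl)]
      ring
    · have hcL : c ∈ L := by
        rcases List.mem_cons.mp hc with h | h
        · exact absurd h.symm hac
        · exact h
      rw [ih hcL (List.nodup_cons.mp hnd).2
        (fun b hb => hp b (List.mem_cons_of_mem _ hb)),
        if_neg (fun hpa => hac ((hp a List.mem_cons_self).mp hpa))]
      ring

theorem pv_sum_ite_const {α : Type} (P : Prop) [Decidable P] (L : List α) (f : α → Int) :
    (L.map (fun a => if P then f a else 0)).sum = if P then (L.map f).sum else 0 := by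
  by_cases h : P <;> simp [h]

theorem pvR3 (a : Int) : PySem.List.pyRange (a - 1) (a + 2) 1 = [a - 1, a, a + 1] := by
  rw [PySem.List.pyRange_one_cons (by omega)]
  rw [show a - 1 + 1 = a by ring, PySem.List.pyRange_one_cons (by omega)]
  rw [PySem.List.pyRange_one_cons (by omega)]
  rw [show a + 1 + 1 = a + 2 by ring, PySem.List.pyRange_one_eq_nil (by omega)]

theorem pv_grid_ext {n : Nat} {g h : List (List Int)} (hg : pvShape n g) (hh : pvShape n h)
    (he : ∀ x < n, ∀ y < n, pvE g x y = pvE h x y) : g = h := by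
  obtain ⟨hg1, hg2⟩ := hg
  obtain ⟨hh1, hh2⟩ := hh
  apply List.ext_getElem (by omega)
  intro x hx1 hx2
  have hxn : x < n := by omega
  have hgx : g.getD x [] = g[x] := by
    rw [List.getD_eq_getElem?_getD, List.getElem?_eq_getElem hx1]; rfl
  have hhx : h.getD x [] = h[x] := by
    rw [List.getD_eq_getElem?_getD, List.getElem?_eq_getElem hx2]; rfl
  apply List.ext_getElem
  · have := hg2 x hxn; have := hh2 x hxn
    rw [hgx] at *; rw [hhx] at *; omega
  intro y hy1 hy2
  have hyn : y < n := by
    have := hg2 x hxn; rw [hgx] at this; omega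
  have := he x hxn y hyn
  simp only [pvE, hgx, hhx] at this
  rw [List.getD_eq_getElem?_getD, List.getD_eq_getElem?_getD,
    List.getElem?_eq_getElem hy1, List.getElem?_eq_getElem hy2] at this
  simpa using this

theorem pvShape_foldl {α : Type} (n : Nat) (L : List α)
    (s : List (List Int) → α → List (List Int))
    (hs : ∀ g a, a ∈ L → pvShape n g → pvShape n (s g a)) :
    ∀ g, pvShape n g → pvShape n (L.foldl s g) := by
  induction L with
  | nil => intro g hg; simpa using hg
  | cons a L ih =>
    intro g hg
    exact ih (fun g a ha hg => hs g a (List.mem_cons_of_mem _ ha) hg) (s g a)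
      (hs g a List.mem_cons_self hg)

-- four nested loops whose innermost body is a guarded `g[t1][t2] += v`
theorem pv_nested4 {α β γ δ : Type} (n x y : Nat) (hx : x < n) (hy : y < n)
    (L1 : List α) (L2 : α → List β) (L3 : α → β → List γ) (L4 : α → β → γ → List δ)
    (cond : α → β → γ → δ → Prop) [inst : ∀ a b c d, Decidable (cond a b c d)]
    (t1 t2 v : α → β → γ → δ → Int)
    (hrange : ∀ a ∈ L1, ∀ b ∈ L2 a, ∀ c ∈ L3 a b, ∀ d ∈ L4 a b c, cond a b c d →
      0 ≤ t1 a b c d ∧ t1 a b c d < n ∧ 0 ≤ t2 a b c d ∧ t2 a b c d < n)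
    (g : List (List Int)) (hg : pvShape n g) :
    pvShape n (L1.foldl (fun p a => (L2 a).foldl (fun p b => (L3 a b).foldl (fun p c =>
        (L4 a b c).foldl (fun p d =>
          if cond a b c d then pvAddAt p (t1 a b c d) (t2 a b c d) (v a b c d) else p)
        p) p) p) g) ∧
    pvE (L1.foldl (fun p a => (L2 a).foldl (fun p b => (L3 a b).foldl (fun p c =>
        (L4 a b c).foldl (fun p d =>
          if cond a b c d then pvAddAt p (t1 a b c d) (t2 a b c d) (v a b c d) else p)
        p) p) p) g) x y
      = pvE g x y + (L1.map (fun a => ((L2 a).map (fun b => ((L3 a b).map (fun c =>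
          ((L4 a b c).map (fun d =>
            if cond a b c d ∧ t1 a b c d = (x : Int) ∧ t2 a b c d = (y : Int)
            then v a b c d else 0)).sum)).sum)).sum)).sum := by
  apply pvE_foldl n x y L1 _ _ ?_ g hg
  intro g a ha hg
  apply pvE_foldl n x y (L2 a) _ _ ?_ g hg
  intro g b hb hg
  apply pvE_foldl n x y (L3 a b) _ _ ?_ g hg
  intro g c hc hg
  apply pvE_foldl n x y (L4 a b c) _ _ ?_ g hg
  intro g d hd hg
  by_cases hcond : cond a b c d
  · obtain ⟨r1, r2, r3, r4⟩ := hrange a ha b hb c hc d hd hcond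
    rw [if_pos hcond]
    refine ⟨pvShape_addAt hg _ _ _, ?_⟩
    rw [pvE_addAt hg r1 r2 r3 r4 hx hy]
    by_cases h2 : t1 a b c d = (x : Int) ∧ t2 a b c d = (y : Int) <;> simp [hcond, h2]
  · rw [if_neg hcond]
    exact ⟨hg, by simp [hcond]⟩

theorem calculerPredation_eq (monde : List (List Int)) :
    calculerPredation monde =
      (PySem.List.pyRange 0 (monde.length : Int) 1).foldl (fun p i =>
        (PySem.List.pyRange 0 (monde.length : Int) 1).foldl (fun p j =>
          (PySem.List.pyRange (i - 1) (i + 2) 1).foldl (fun p k =>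
            (PySem.List.pyRange (j - 1) (j + 2) 1).foldl (fun p l =>
              if k ≠ i ∨ l ≠ j then
                pvAddAt p i j
                  (PySem.List.pyGetD
                    (PySem.List.pyGetD monde (PySem.Int.mod k (monde.length : Int)) [])
                    (PySem.Int.mod l (monde.length : Int)) 0)
              else p) p) p) p)
        ((PySem.List.pyRange 0 (monde.length : Int) 1).map
          (fun _ => (PySem.List.pyRange 0 (monde.length : Int) 1).map (fun _ => (0 : Int)))) := rfl

theorem pv_initA_shape (monde : List (List Int)) :
    pvShape monde.length ((PySem.List.pyRange 0 (monde.length : Int) 1).map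
      (fun _ => (PySem.List.pyRange 0 (monde.length : Int) 1).map (fun _ => (0 : Int)))) := by
  constructor
  · simp [PySem.List.length_pyRange_one]
  · intro x hxn
    rw [List.getD_eq_getElem?_getD, List.getElem?_map]
    have : x < ((PySem.List.pyRange 0 (monde.length : Int) 1)).length := by
      simp [PySem.List.length_pyRange_one]; omega
    rw [List.getElem?_eq_getElem this]
    simp [PySem.List.length_pyRange_one]

theorem pv_initA_E (monde : List (List Int)) (x y : Nat) :
    pvE ((PySem.List.pyRange 0 (monde.length : Int) 1).map
      (fun _ => (PySem.List.pyRange 0 (monde.length : Int) 1).map (fun _ => (0 : Int)))) x y = 0 := by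
  unfold pvE
  simp only [List.getD_eq_getElem?_getD, List.getElem?_map]
  cases h : (PySem.List.pyRange 0 (monde.length : Int) 1)[x]? with
  | none => simp
  | some i =>
    simp only [Option.map_some, Option.getD_some, List.getElem?_map]
    cases h2 : (PySem.List.pyRange 0 (monde.length : Int) 1)[y]? <;> simp

theorem portA_char (monde : List (List Int)) :
    pvShape monde.length (calculerPredation monde) ∧
    ∀ x < monde.length, ∀ y < monde.length,
      pvE (calculerPredation monde) x y = pvS monde x y := by
  rw [calculerPredation_eq]
  constructor
  · apply pvShape_foldl _ _ _ ?_ _ (pv_initA_shape monde)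
    intro g i _ hg
    apply pvShape_foldl _ _ _ ?_ _ hg
    intro g j _ hg
    apply pvShape_foldl _ _ _ ?_ _ hg
    intro g k _ hg
    apply pvShape_foldl _ _ _ ?_ _ hg
    intro g l _ hg
    split
    · exact pvShape_addAt hg _ _ _
    · exact hg
  · intro x hx y hy
    have hn : (0 : Int) < (monde.length : Int) := by exact_mod_cast (by omega : 0 < monde.length)
    have hE := (pv_nested4 monde.length x y hx hy
      (PySem.List.pyRange 0 (monde.length : Int) 1)
      (fun _ => PySem.List.pyRange 0 (monde.length : Int) 1)
      (fun i _ => PySem.List.pyRange (i - 1) (i + 2) 1)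
      (fun _ j _ => PySem.List.pyRange (j - 1) (j + 2) 1)
      (fun i j k l => k ≠ i ∨ l ≠ j)
      (fun i _ _ _ => i) (fun _ j _ _ => j)
      (fun i j k l =>
        PySem.List.pyGetD (PySem.List.pyGetD monde (PySem.Int.mod k (monde.length : Int)) [])
          (PySem.Int.mod l (monde.length : Int)) 0)
      (by
        intro i hi j hj k _ l _ _
        rw [PySem.List.mem_pyRange_one] at hi hj
        exact ⟨hi.1, hi.2, hj.1, hj.2⟩) _ (pv_initA_shape monde)).2
    rw [pv_initA_E, zero_add] at hE
    refine hE.trans ?_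
    clear hE
    have hW : ∀ i j : Int,
        ((PySem.List.pyRange (i - 1) (i + 2) 1).map (fun k =>
          ((PySem.List.pyRange (j - 1) (j + 2) 1).map (fun l =>
            if (k ≠ i ∨ l ≠ j) ∧ i = (x : Int) ∧ j = (y : Int) then
              PySem.List.pyGetD
                (PySem.List.pyGetD monde (PySem.Int.mod k (monde.length : Int)) [])
                (PySem.Int.mod l (monde.length : Int)) 0
            else 0)).sum)).sum
        = if i = (x : Int) ∧ j = (y : Int) then
            ((PySem.List.pyRange (i - 1) (i + 2) 1).map (fun k =>
              ((PySem.List.pyRange (j - 1) (j + 2) 1).map (fun l =>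
                if k ≠ i ∨ l ≠ j then
                  PySem.List.pyGetD
                    (PySem.List.pyGetD monde (PySem.Int.mod k (monde.length : Int)) [])
                    (PySem.Int.mod l (monde.length : Int)) 0
                else 0)).sum)).sum
          else 0 := by
      intro i j
      by_cases h : i = (x : Int) ∧ j = (y : Int)
      · obtain ⟨h1, h2⟩ := h
        subst h1; subst h2
        simp
      · rw [if_neg h]
        apply List.sum_eq_zero
        intro t ht
        obtain ⟨k, -, rfl⟩ := List.mem_map.mp ht
        apply List.sum_eq_zero
        intro t ht
        obtain ⟨l, -, rfl⟩ := List.mem_map.mp ht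
        simp [h]
    simp only [hW]
    have hymem : ((y : Int)) ∈ PySem.List.pyRange 0 (monde.length : Int) 1 :=
      PySem.List.mem_pyRange_one.mpr ⟨by omega, by exact_mod_cast hy⟩
    have hxmem : ((x : Int)) ∈ PySem.List.pyRange 0 (monde.length : Int) 1 :=
      PySem.List.mem_pyRange_one.mpr ⟨by omega, by exact_mod_cast hx⟩
    have hj : ∀ i : Int,
        ((PySem.List.pyRange 0 (monde.length : Int) 1).map (fun j =>
          if i = (x : Int) ∧ j = (y : Int) then
            ((PySem.List.pyRange (i - 1) (i + 2) 1).map (fun k =>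
              ((PySem.List.pyRange (j - 1) (j + 2) 1).map (fun l =>
                if k ≠ i ∨ l ≠ j then
                  PySem.List.pyGetD
                    (PySem.List.pyGetD monde (PySem.Int.mod k (monde.length : Int)) [])
                    (PySem.Int.mod l (monde.length : Int)) 0
                else 0)).sum)).sum
          else 0)).sum
        = if i = (x : Int) then
            ((PySem.List.pyRange (i - 1) (i + 2) 1).map (fun k =>
              ((PySem.List.pyRange ((y : Int) - 1) ((y : Int) + 2) 1).map (fun l =>
                if k ≠ i ∨ l ≠ (y : Int) then
                  PySem.List.pyGetD
                    (PySem.List.pyGetD monde (PySem.Int.mod k (monde.length : Int)) [])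
                    (PySem.Int.mod l (monde.length : Int)) 0
                else 0)).sum)).sum
          else 0 := by
      intro i
      have hfun : (fun j : Int =>
          if i = (x : Int) ∧ j = (y : Int) then
            ((PySem.List.pyRange (i - 1) (i + 2) 1).map (fun k =>
              ((PySem.List.pyRange (j - 1) (j + 2) 1).map (fun l =>
                if k ≠ i ∨ l ≠ j then
                  PySem.List.pyGetD
                    (PySem.List.pyGetD monde (PySem.Int.mod k (monde.length : Int)) [])
                    (PySem.Int.mod l (monde.length : Int)) 0
                  else 0)).sum)).sum
          else 0)
          = fun j : Int =>
          if i = (x : Int) then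
            (if j = (y : Int) then
              ((PySem.List.pyRange (i - 1) (i + 2) 1).map (fun k =>
                ((PySem.List.pyRange (j - 1) (j + 2) 1).map (fun l =>
                  if k ≠ i ∨ l ≠ j then
                    PySem.List.pyGetD
                      (PySem.List.pyGetD monde (PySem.Int.mod k (monde.length : Int)) [])
                      (PySem.Int.mod l (monde.length : Int)) 0
                  else 0)).sum)).sum
            else 0)
          else 0 := by
        funext j
        by_cases h1 : i = (x : Int) <;> by_cases h2 : j = (y : Int) <;> simp [h1, h2]
      rw [hfun, pv_sum_ite_const]
      by_cases h1 : i = (x : Int)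
      · rw [if_pos h1, if_pos h1,
          pv_sum_ite_unique _ _ _ ((y : Int)) hymem (PySem.List.nodup_pyRange_one _ _)
            (fun a _ => Iff.rfl)]
      · rw [if_neg h1, if_neg h1]
    simp only [hj]
    rw [pv_sum_ite_unique _ _ _ ((x : Int)) hxmem (PySem.List.nodup_pyRange_one _ _)
      (fun a _ => Iff.rfl)]
    rw [pvR3, pvR3]
    have hmod : ∀ a : Int, PySem.Int.mod a (monde.length : Int) = a % (monde.length : Int) :=
      fun a => PySem.Int.mod_eq_emod_of_pos hn
    simp only [List.map_cons, List.map_nil, List.sum_cons, List.sum_nil, hmod]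
    have c1 : ((x : Int) - 1 ≠ (x : Int) ∨ (y : Int) - 1 ≠ (y : Int)) := Or.inl (by omega)
    have c2 : ((x : Int) - 1 ≠ (x : Int) ∨ (y : Int) ≠ (y : Int)) := Or.inl (by omega)
    have c3 : ((x : Int) - 1 ≠ (x : Int) ∨ (y : Int) + 1 ≠ (y : Int)) := Or.inl (by omega)
    have c4 : ((x : Int) ≠ (x : Int) ∨ (y : Int) - 1 ≠ (y : Int)) := Or.inr (by omega)
    have c5 : ¬((x : Int) ≠ (x : Int) ∨ (y : Int) ≠ (y : Int)) := by simp
    have c6 : ((x : Int) ≠ (x : Int) ∨ (y : Int) + 1 ≠ (y : Int)) := Or.inr (by omega)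
    have c7 : ((x : Int) + 1 ≠ (x : Int) ∨ (y : Int) - 1 ≠ (y : Int)) := Or.inl (by omega)
    have c8 : ((x : Int) + 1 ≠ (x : Int) ∨ (y : Int) ≠ (y : Int)) := Or.inl (by omega)
    have c9 : ((x : Int) + 1 ≠ (x : Int) ∨ (y : Int) + 1 ≠ (y : Int)) := Or.inl (by omega)
    rw [if_pos c1, if_pos c2, if_pos c3, if_pos c4, if_neg c5, if_pos c6, if_pos c7,
      if_pos c8, if_pos c9]
    simp only [pvS]
    ring

-- ===== B-side lemmas: rotations, zips, and the separable decomposition =====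

theorem pvZip_getD {α β γ : Type} (f : α → β → γ) (as : List α) (bs : List β) (j : Nat)
    (h1 : j < as.length) (h2 : j < bs.length) (da : α) (db : β) (dc : γ) :
    (List.zipWith f as bs).getD j dc = f (as.getD j da) (bs.getD j db) := by
  have hl : j < (List.zipWith f as bs).length := by
    rw [List.length_zipWith]; omega
  rw [List.getD_eq_getElem?_getD, List.getElem?_eq_getElem hl, List.getElem_zipWith,
    List.getD_eq_getElem?_getD, List.getD_eq_getElem?_getD,
    List.getElem?_eq_getElem h1, List.getElem?_eq_getElem h2]
  rfl

theorem pvRotR_len {α : Type} (r : List α) (h : r ≠ []) :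
    (r.drop (r.length - 1) ++ r.dropLast).length = r.length := by
  have : 0 < r.length := List.length_pos_iff.mpr h
  rw [List.length_append, List.length_drop, List.length_dropLast]; omega

theorem pvRotL_len {α : Type} (r : List α) (h : r ≠ []) :
    (r.tail ++ r.take 1).length = r.length := by
  have : 0 < r.length := List.length_pos_iff.mpr h
  rw [List.length_append, List.length_tail, List.length_take]; omega

theorem pvRotR_getD {α : Type} (r : List α) (d : α) (j : Nat) (hj : j < r.length) :
    (r.drop (r.length - 1) ++ r.dropLast).getD j d
      = r.getD ((j + r.length - 1) % r.length) d := by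
  have hn : 0 < r.length := by omega
  have l1 : (r.drop (r.length - 1)).length = 1 := by rw [List.length_drop]; omega
  rw [List.getD_eq_getElem?_getD, List.getD_eq_getElem?_getD]
  by_cases h0 : j = 0
  · subst h0
    rw [List.getElem?_append_left (by omega), List.getElem?_drop]
    have hm : (0 + r.length - 1) % r.length = r.length - 1 := by
      rw [Nat.zero_add]; exact Nat.mod_eq_of_lt (by omega)
    rw [hm, show r.length - 1 + 0 = r.length - 1 by omega]
  · rw [List.getElem?_append_right (by omega)]
    rw [List.dropLast_eq_take, List.getElem?_take]
    rw [if_pos (by rw [l1]; omega)]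
    have hm : (j + r.length - 1) % r.length = j - 1 := by
      rw [show j + r.length - 1 = (j - 1) + r.length by omega, Nat.add_mod_right]
      exact Nat.mod_eq_of_lt (by omega)
    rw [hm, l1]

theorem pvRotL_getD {α : Type} (r : List α) (d : α) (j : Nat) (hj : j < r.length) :
    (r.tail ++ r.take 1).getD j d = r.getD ((j + 1) % r.length) d := by
  have hn : 0 < r.length := by omega
  have l1 : r.tail.length = r.length - 1 := List.length_tail
  rw [List.getD_eq_getElem?_getD, List.getD_eq_getElem?_getD]
  by_cases hl : j < r.length - 1
  · rw [List.getElem?_append_left (by omega), List.getElem?_tail]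
    have hm : (j + 1) % r.length = j + 1 := Nat.mod_eq_of_lt (by omega)
    rw [hm]
  · rw [List.getElem?_append_right (by omega)]
    rw [List.getElem?_take, if_pos (by rw [l1]; omega)]
    have hm : (j + 1) % r.length = 0 := by
      rw [show j + 1 = r.length by omega]
      exact Nat.mod_self _
    rw [hm, l1, show j - (r.length - 1) = 0 by omega]

-- pvS in terms of Nat-modular grid reads
theorem pvS_nat (monde : List (List Int)) (x y : Nat)
    (hx : x < monde.length) (hy : y < monde.length) :
    pvS monde x y =
      pvE monde ((x + monde.length - 1) % monde.length) ((y + monde.length - 1) % monde.length)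
    + pvE monde ((x + monde.length - 1) % monde.length) y
    + pvE monde ((x + monde.length - 1) % monde.length) ((y + 1) % monde.length)
    + pvE monde x ((y + monde.length - 1) % monde.length)
    + pvE monde x ((y + 1) % monde.length)
    + pvE monde ((x + 1) % monde.length) ((y + monde.length - 1) % monde.length)
    + pvE monde ((x + 1) % monde.length) y
    + pvE monde ((x + 1) % monde.length) ((y + 1) % monde.length) := by
  have hn : 0 < monde.length := by omega
  have em : ∀ a : Nat, ((a : Int)) % (monde.length : Int) = ((a % monde.length : Nat) : Int) := by
    intro a; rw [Int.natCast_emod]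
  have eSub : ∀ a : Nat, a < monde.length →
      ((a : Int) - 1) % (monde.length : Int) = (((a + monde.length - 1) % monde.length : Nat) : Int) := by
    intro a ha
    have h1 : ((a : Int) - 1) = ((a + monde.length - 1 : Nat) : Int) - (monde.length : Int) := by
      omega
    rw [h1, Int.sub_emod_right, em]
  have eSelf : ∀ a : Nat, a < monde.length →
      ((a : Int)) % (monde.length : Int) = ((a : Nat) : Int) := by
    intro a ha
    rw [em, Nat.mod_eq_of_lt ha]
  have eAdd : ∀ a : Nat, ((a : Int) + 1) % (monde.length : Int)
      = (((a + 1) % monde.length : Nat) : Int) := by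
    intro a
    have h1 : ((a : Int) + 1) = ((a + 1 : Nat) : Int) := by omega
    rw [h1, em]
  simp only [pvS, eSub x hx, eSub y hy, eSelf x hx, eSelf y hy, eAdd, pvE,
    PySem.List.pyGetD_natCast]

-- proof-only names for B's two stages: the truncated grid and the horizontal blur
def pvG (monde : List (List Int)) : List (List Int) :=
  monde.map (fun r =>
    (PySem.List.pyRange 0 (monde.length : Int) 1).map (fun j => PySem.List.pyGetD r j 0))

def pvH (monde : List (List Int)) : List (List Int) :=
  (pvG monde).map (fun r =>
    List.zipWith (fun s c => s + c)
      (List.zipWith (fun a b => a + b) (r.drop (r.length - 1) ++ r.dropLast) r)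
      (r.tail ++ r.take 1))

theorem pvSlice_one {α : Type} (r : List α) :
    PySem.List.slice r none (some 1) = r.take 1 := by
  rw [PySem.List.slice_to r (by norm_num)]
  rfl

theorem pvAlt_eq (monde : List (List Int)) :
    calculerPredation_alt monde =
      List.zipWith (fun s mr => List.zipWith (fun t m => t - m) s mr)
        (List.zipWith (fun s dr => List.zipWith (fun t d => t + d) s dr)
          (List.zipWith (fun ur hr => List.zipWith (fun u h => u + h) ur hr)
            ((pvH monde).drop ((pvH monde).length - 1) ++ (pvH monde).dropLast) (pvH monde))
          ((pvH monde).tail ++ (pvH monde).take 1))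
        (pvG monde) := by
  simp only [calculerPredation_alt, pvH, pvG, PySem.List.slice_from_neg_one,
    PySem.List.slice_to_neg_one, PySem.List.slice_from_one, pvSlice_one]

theorem pvGetD_in {α : Type} (l : List α) (d : α) (i : Nat) (h : i < l.length) :
    l.getD i d = l[i] := by
  rw [List.getD_eq_getElem?_getD, List.getElem?_eq_getElem h]
  rfl

theorem pvG_len (monde : List (List Int)) : (pvG monde).length = monde.length := by
  simp [pvG]

theorem pvG_getD (monde : List (List Int)) (i : Nat) (hi : i < monde.length) :
    (pvG monde).getD i []
      = (PySem.List.pyRange 0 (monde.length : Int) 1).map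
          (fun j => PySem.List.pyGetD (monde.getD i []) j 0) := by
  rw [pvGetD_in _ _ i (by rw [pvG_len]; omega), pvGetD_in _ _ i hi]
  simp [pvG]

theorem pvG_len_row (monde : List (List Int))
    (i : Nat) (hi : i < monde.length) :
    ((pvG monde).getD i []).length = monde.length := by
  rw [pvG_getD _ _ hi, List.length_map, PySem.List.length_pyRange_one]
  omega

theorem pvG_ent (monde : List (List Int)) (i j : Nat) (hi : i < monde.length)
    (hj : j < monde.length) :
    ((pvG monde).getD i []).getD j 0 = pvE monde i j := by
  rw [pvG_getD _ _ hi, ← PySem.List.pyGetD_natCast,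
    PySem.List.pyGetD_map_pyRange _ monde.length j _ hj, PySem.List.pyGetD_natCast]
  rfl

theorem pvH_len (monde : List (List Int)) : (pvH monde).length = monde.length := by
  simp [pvH, pvG]

theorem pvH_getD (monde : List (List Int)) (i : Nat) (hi : i < monde.length) :
    (pvH monde).getD i [] =
      List.zipWith (fun s c => s + c)
        (List.zipWith (fun a b => a + b)
          (((pvG monde).getD i []).drop (((pvG monde).getD i []).length - 1)
            ++ ((pvG monde).getD i []).dropLast) ((pvG monde).getD i []))
        (((pvG monde).getD i []).tail ++ ((pvG monde).getD i []).take 1) := by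
  rw [pvGetD_in _ _ i (by rw [pvH_len]; omega)]
  rw [pvGetD_in _ _ i (by rw [pvG_len]; omega)]
  simp [pvH]

theorem pvRow_ne (monde : List (List Int))
    (i : Nat) (hi : i < monde.length) : (pvG monde).getD i [] ≠ [] := by
  intro h
  have := pvG_len_row monde i hi
  rw [h] at this
  simp at this
  omega

theorem pvH_len_row (monde : List (List Int))
    (i : Nat) (hi : i < monde.length) :
    ((pvH monde).getD i []).length = monde.length := by
  rw [pvH_getD _ _ hi, List.length_zipWith, List.length_zipWith,
    pvRotR_len _ (pvRow_ne monde i hi), pvRotL_len _ (pvRow_ne monde i hi),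
    pvG_len_row monde i hi]
  omega

theorem pvH_ent (monde : List (List Int))
    (i j : Nat) (hi : i < monde.length) (hj : j < monde.length) :
    ((pvH monde).getD i []).getD j 0 =
      pvE monde i ((j + monde.length - 1) % monde.length) + pvE monde i j
        + pvE monde i ((j + 1) % monde.length) := by
  have hrl : ((pvG monde).getD i []).length = monde.length := pvG_len_row monde i hi
  have hne : (pvG monde).getD i [] ≠ [] := pvRow_ne monde i hi
  have hjr : j < ((pvG monde).getD i []).length := by omega
  rw [pvH_getD _ _ hi]
  rw [pvZip_getD _ _ _ j
    (by rw [List.length_zipWith, pvRotR_len _ hne]; omega)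
    (by rw [pvRotL_len _ hne]; omega) 0 0 0]
  rw [pvZip_getD _ _ _ j (by rw [pvRotR_len _ hne]; omega) hjr 0 0 0]
  rw [pvRotR_getD _ 0 j hjr, pvRotL_getD _ 0 j hjr, hrl]
  rw [pvG_ent monde i _ hi (Nat.mod_lt _ (by omega)),
    pvG_ent monde i j hi hj,
    pvG_ent monde i _ hi (Nat.mod_lt _ (by omega))]

theorem portB_char (monde : List (List Int)) :
    pvShape monde.length (calculerPredation_alt monde) ∧
    ∀ x < monde.length, ∀ y < monde.length,
      pvE (calculerPredation_alt monde) x y = pvS monde x y := by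
  rw [pvAlt_eq]
  have hrow : ∀ x : Nat, x < monde.length →
      (List.zipWith (fun s mr => List.zipWith (fun t m => t - m) s mr)
        (List.zipWith (fun s dr => List.zipWith (fun t d => t + d) s dr)
          (List.zipWith (fun ur hr => List.zipWith (fun u h => u + h) ur hr)
            ((pvH monde).drop ((pvH monde).length - 1) ++ (pvH monde).dropLast) (pvH monde))
          ((pvH monde).tail ++ (pvH monde).take 1))
        (pvG monde)).getD x []
      = List.zipWith (fun t m => t - m)
          (List.zipWith (fun t d => t + d)
            (List.zipWith (fun u h => u + h)
              ((pvH monde).getD ((x + monde.length - 1) % monde.length) [])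
              ((pvH monde).getD x []))
            ((pvH monde).getD ((x + 1) % monde.length) []))
          ((pvG monde).getD x []) := by
    intro x hx
    have hHne : pvH monde ≠ [] := by
      intro h
      have := pvH_len monde
      rw [h] at this
      simp at this
      omega
    have hxH : x < (pvH monde).length := by rw [pvH_len]; omega
    rw [pvZip_getD _ _ _ x
      (by rw [List.length_zipWith, List.length_zipWith, pvRotR_len _ hHne,
        pvRotL_len _ hHne, pvH_len]; omega)
      (by rw [pvG_len]; omega) [] [] []]
    rw [pvZip_getD _ _ _ x
      (by rw [List.length_zipWith, pvRotR_len _ hHne, pvH_len]; omega)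
      (by rw [pvRotL_len _ hHne, pvH_len]; omega) [] [] []]
    rw [pvZip_getD _ _ _ x (by rw [pvRotR_len _ hHne, pvH_len]; omega) hxH [] [] []]
    rw [pvRotR_getD _ [] x hxH, pvRotL_getD _ [] x hxH, pvH_len]
  constructor
  · constructor
    · have hHne' : monde.length = 0 ∨ pvH monde ≠ [] := by
        by_cases h : monde.length = 0
        · exact Or.inl h
        · refine Or.inr ?_
          intro hh
          have := pvH_len monde
          rw [hh] at this
          simp at this
          omega
      rcases hHne' with h | hHne
      · have hm : monde = [] := List.length_eq_zero_iff.mp h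
        subst hm
        rfl
      · rw [List.length_zipWith, List.length_zipWith, List.length_zipWith,
          pvRotR_len _ hHne, pvRotL_len _ hHne, pvH_len, pvG_len]
        omega
    · intro x hx
      rw [hrow x hx, List.length_zipWith, List.length_zipWith, List.length_zipWith,
        pvH_len_row monde _ (Nat.mod_lt _ (by omega)),
        pvH_len_row monde _ hx,
        pvH_len_row monde _ (Nat.mod_lt _ (by omega)),
        pvG_len_row monde _ hx]
      omega
  · intro x hx y hy
    unfold pvE
    rw [hrow x hx]
    have lup : ((pvH monde).getD ((x + monde.length - 1) % monde.length) []).length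
        = monde.length := pvH_len_row monde _ (Nat.mod_lt _ (by omega))
    have lmid : ((pvH monde).getD x []).length = monde.length :=
      pvH_len_row monde _ hx
    have ldown : ((pvH monde).getD ((x + 1) % monde.length) []).length = monde.length :=
      pvH_len_row monde _ (Nat.mod_lt _ (by omega))
    have lg : ((pvG monde).getD x []).length = monde.length :=
      pvG_len_row monde _ hx
    rw [pvZip_getD _ _ _ y
      (by rw [List.length_zipWith, List.length_zipWith, lup, lmid, ldown]; omega)
      (by omega) 0 0 0]
    rw [pvZip_getD _ _ _ y
      (by rw [List.length_zipWith, lup, lmid]; omega) (by omega) 0 0 0]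
    rw [pvZip_getD _ _ _ y (by omega) (by omega) 0 0 0]
    rw [pvH_ent monde _ y (Nat.mod_lt _ (by omega)) hy,
      pvH_ent monde x y hx hy,
      pvH_ent monde _ y (Nat.mod_lt _ (by omega)) hy,
      pvG_ent monde x y hx hy]
    rw [pvS_nat monde x y hx hy]
    ring

-- ===== VERDICT (by name: the statement is the Claim_ definition above) =====
theorem calculerPredation_spec : Claim_equal_calculerPredation := by
  intro monde _ hpre
  unfold Spec_calculerPredation
  obtain ⟨hsA, heA⟩ := portA_char monde
  obtain ⟨hsB, heB⟩ := portB_char monde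
  exact pv_grid_ext hsA hsB (fun x hx y hy => (heA x hx y hy).trans (heB x hx y hy).symm)
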